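-- pv_equiv track=rewrite | github.com/MichaelT-178/ApartmentRegistry | Python/createUML.py | create_uml_getters_and_setters
-- ===== SOURCE A (Python) =====
-- def create_uml_getters_and_setters(a_list):
--     theString = ""
--
--     for var in a_list:
--
--         name = var.split()[1]
--
--         theString += f"+ get{name[0].upper() + name[1:]}() : {var.split()[2]}\n"
--
--     for var in a_list:
--         name = var.split()[1]
--
--         theString += f"+ set{name[0].upper() + name[1:]}({name} : {var.split()[2]})\n"
--
--     return f"{theString}+ toString() : Sting\n"
-- ===== SOURCE B (Python) =====
-- def create_uml_getters_and_setters(a_list):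
--     # Recursive decomposition: one structural recursion over the list builds
--     # the getter block and the setter block together, prepending each pair of
--     # lines to the result for the tail; lines are formatted once per variable.
--     def rec(items):
--         if not items:
--             return ("", "")
--         g, s = rec(items[1:])
--         w = items[0].split()
--         n, t = w[1], w[2]
--         c = n[0].upper() + n[1:]
--         return (f"+ get{c}() : {t}\n" + g, f"+ set{c}({n} : {t})\n" + s)
--     g, s = rec(a_list)
--     return g + s + "+ toString() : Sting\n"
-- ===== Notes on version B (the rewrite author's own statement) =====
-- stated objective: alternative
-- what changed: B replaces A's two separate accumulator passes (each re-splitting every declaration) with one structural recursion over the list that splits each declaration once and builds the getter and setter blocks together by prepending.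
import Mathlib
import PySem

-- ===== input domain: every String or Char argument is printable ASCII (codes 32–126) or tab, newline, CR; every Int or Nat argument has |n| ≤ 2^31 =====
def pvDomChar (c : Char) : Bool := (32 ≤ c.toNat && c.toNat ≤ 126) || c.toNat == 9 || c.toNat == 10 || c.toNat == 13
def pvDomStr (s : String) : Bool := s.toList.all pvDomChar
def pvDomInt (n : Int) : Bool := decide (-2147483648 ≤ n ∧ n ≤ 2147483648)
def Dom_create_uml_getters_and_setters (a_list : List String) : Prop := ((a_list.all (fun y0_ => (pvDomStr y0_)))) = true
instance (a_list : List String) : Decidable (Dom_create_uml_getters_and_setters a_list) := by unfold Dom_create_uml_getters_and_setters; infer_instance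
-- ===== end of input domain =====

-- B builds the getter and setter blocks in one structural recursion (prepending lines) instead of
-- A's two separate accumulator passes; equivalence of the RETURN value is proved on inputs where
-- every declaration splits into ≥ 3 words (elsewhere A raises IndexError).

-- ===== PORT A =====
-- the f-string f"+ get{name[0].upper() + name[1:]}() : {var.split()[2]}\n"
def pvGetterLine (var : String) : String :=
  let name := (PySem.List.pyGet? (PySem.Str.split₀ var) 1).getD ""
  "+ get" ++ (String.singleton (PySem.Chars.upperChar ((PySem.Str.pyGet? name 0).getD ' ')) ++
    PySem.Str.slice name (some 1) none) ++ "() : " ++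
    ((PySem.List.pyGet? (PySem.Str.split₀ var) 2).getD "") ++ "\n"

-- the f-string f"+ set{name[0].upper() + name[1:]}({name} : {var.split()[2]})\n"
def pvSetterLine (var : String) : String :=
  let name := (PySem.List.pyGet? (PySem.Str.split₀ var) 1).getD ""
  "+ set" ++ (String.singleton (PySem.Chars.upperChar ((PySem.Str.pyGet? name 0).getD ' ')) ++
    PySem.Str.slice name (some 1) none) ++ "(" ++ name ++ " : " ++
    ((PySem.List.pyGet? (PySem.Str.split₀ var) 2).getD "") ++ ")\n"

def create_uml_getters_and_setters (a_list : List String) : String :=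
  let s1 := a_list.foldl (fun theString var => theString ++ pvGetterLine var) ""
  let s2 := a_list.foldl (fun theString var => theString ++ pvSetterLine var) s1
  s2 ++ "+ toString() : Sting\n"

-- ===== PORT B =====
-- rec: structural recursion building (getter block, setter block) by prepending; formatting inlined.
def pvRecUml : List String → String × String
  | [] => ("", "")
  | item :: rest =>
      let gs := pvRecUml rest
      let w := PySem.Str.split₀ item
      let n := (PySem.List.pyGet? w 1).getD ""
      let t := (PySem.List.pyGet? w 2).getD ""
      let c := String.singleton (PySem.Chars.upperChar ((PySem.Str.pyGet? n 0).getD ' ')) ++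
        PySem.Str.slice n (some 1) none
      ("+ get" ++ c ++ "() : " ++ t ++ "\n" ++ gs.1,
       "+ set" ++ c ++ "(" ++ n ++ " : " ++ t ++ ")\n" ++ gs.2)

def create_uml_getters_and_setters_alt (a_list : List String) : String :=
  let gs := pvRecUml a_list
  gs.1 ++ gs.2 ++ "+ toString() : Sting\n"

-- ===== PRECONDITION & SPEC =====
-- Pre_ excludes exactly the inputs on which A raises IndexError: a declaration with fewer than 3 whitespace-separated words.
def Pre_create_uml_getters_and_setters (a_list : List String) : Prop :=
  ∀ var ∈ a_list, 3 ≤ (PySem.Str.split₀ var).length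
instance (a_list : List String) : Decidable (Pre_create_uml_getters_and_setters a_list) := by
  unfold Pre_create_uml_getters_and_setters; infer_instance
def pvWitness_create_uml_getters_and_setters : List String := ["int count 0", "str name x"]

def Spec_create_uml_getters_and_setters (a_list : List String) (out : String) : Prop := out = create_uml_getters_and_setters_alt a_list
instance (a_list : List String) (out : String) : Decidable (Spec_create_uml_getters_and_setters a_list out) := by unfold Spec_create_uml_getters_and_setters; infer_instance

-- ===== CLAIM (what is proved, stated in full; the proofs are below) =====
def Claim_equal_create_uml_getters_and_setters : Prop := ∀ (a_list : List String), Dom_create_uml_getters_and_setters a_list → Pre_create_uml_getters_and_setters a_list → Spec_create_uml_getters_and_setters a_list (create_uml_getters_and_setters a_list)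

-- ===== LEMMAS AND PROOFS =====

-- A's accumulator loop flattens: characters of the fold = init's characters ++ each line's characters.
theorem pv_foldl_append_toList (f : String → String) (l : List String) (init : String) :
    (l.foldl (fun acc v => acc ++ f v) init).toList
      = init.toList ++ l.flatMap (fun v => (f v).toList) := by
  induction l generalizing init with
  | nil => simp
  | cons x xs ih => simp [List.foldl_cons, ih, List.append_assoc]

-- B's recursion computes exactly the two flattened line blocks.
theorem pv_rec_uml_eq (l : List String) :
    ((pvRecUml l).1.toList = l.flatMap (fun v => (pvGetterLine v).toList))
    ∧ ((pvRecUml l).2.toList = l.flatMap (fun v => (pvSetterLine v).toList)) := by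
  induction l with
  | nil => simp [pvRecUml]
  | cons x xs ih =>
    simp [pvRecUml, pvGetterLine, pvSetterLine, ih.1, ih.2]

-- ===== VERDICT (by name: the statement is the Claim_ definition above) =====
theorem create_uml_getters_and_setters_spec : Claim_equal_create_uml_getters_and_setters := by
  intro a_list _ _
  unfold Spec_create_uml_getters_and_setters
  unfold create_uml_getters_and_setters create_uml_getters_and_setters_alt
  apply String.toList_inj.mp
  simp only [pv_foldl_append_toList, String.toList_append,
    (pv_rec_uml_eq a_list).1, (pv_rec_uml_eq a_list).2]
  simp [List.append_assoc]
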